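-- pv_equiv track=rewrite | github.com/oy-vey/algorithms-and-data-structures | 6-GenomeAssemblyProgrammingChallenge/Week3/bubble_detection.py | is_disjoint
-- ===== SOURCE A (Python) =====
-- def is_disjoint(path0, path1):
--     for i in path0[1:-1]:
--         if i in path1[1:-1]:
--             return False
--     for i in path1[1:-1]:
--         if i in path0[1:-1]:
--             return False
--     return True
-- ===== SOURCE B (Python) =====
-- def is_disjoint(path0, path1):
--     s0 = sorted(path0[1:-1])
--     s1 = sorted(path1[1:-1])
--     i = j = 0
--     while i < len(s0) and j < len(s1):
--         if s0[i] < s1[j]: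
--             i += 1
--         elif s1[j] < s0[i]:
--             j += 1
--         else:
--             return False
--     return True
-- ===== Notes on version B (the rewrite author's own statement) =====
-- stated objective: alternative
-- what changed: Replaces the nested membership scans over repeatedly re-sliced lists with sorting both interior slices once and a single two-pointer merge pass that stops at the first common element.
import Mathlib
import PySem

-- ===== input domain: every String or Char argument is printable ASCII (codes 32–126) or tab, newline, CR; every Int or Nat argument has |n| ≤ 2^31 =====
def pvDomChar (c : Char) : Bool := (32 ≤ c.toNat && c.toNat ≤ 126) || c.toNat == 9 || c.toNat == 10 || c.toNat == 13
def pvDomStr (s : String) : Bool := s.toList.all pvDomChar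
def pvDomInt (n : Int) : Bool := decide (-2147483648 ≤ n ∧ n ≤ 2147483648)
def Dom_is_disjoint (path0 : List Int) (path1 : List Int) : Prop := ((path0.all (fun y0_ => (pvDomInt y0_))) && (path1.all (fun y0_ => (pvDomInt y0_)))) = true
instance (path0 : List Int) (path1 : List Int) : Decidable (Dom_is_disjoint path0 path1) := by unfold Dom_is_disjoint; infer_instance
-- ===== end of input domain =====

-- B sorts the two interior slices once and checks for a common element in one merge pass,
-- replacing A's nested membership scans over repeatedly re-sliced lists.

-- ===== PORT A =====
-- the two early-return membership loops become `any` over the same slices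
def is_disjoint (path0 : List Int) (path1 : List Int) : Bool :=
  if (PySem.List.slice path0 (some 1) (some (-1))).any
      (fun i => i ∈ PySem.List.slice path1 (some 1) (some (-1))) then false
  else if (PySem.List.slice path1 (some 1) (some (-1))).any
      (fun i => i ∈ PySem.List.slice path0 (some 1) (some (-1))) then false
  else true

-- ===== PORT B =====
-- the two-pointer while loop of Source B: advance past the smaller head, stop on equality
def mergeDisjoint : List Int → List Int → Bool
  | [], _ => true
  | _ :: _, [] => true
  | x :: xs, y :: ys =>
    if x < y then mergeDisjoint xs (y :: ys)
    else if y < x then mergeDisjoint (x :: xs) ys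
    else false

def is_disjoint_alt (path0 : List Int) (path1 : List Int) : Bool :=
  mergeDisjoint
    (PySem.List.sorted (PySem.List.slice path0 (some 1) (some (-1))) (fun x => x) false)
    (PySem.List.sorted (PySem.List.slice path1 (some 1) (some (-1))) (fun x => x) false)

-- ===== PRECONDITION & SPEC =====
def Spec_is_disjoint (path0 : List Int) (path1 : List Int) (out : Bool) : Prop := out = is_disjoint_alt path0 path1
instance (path0 : List Int) (path1 : List Int) (out : Bool) : Decidable (Spec_is_disjoint path0 path1 out) := by unfold Spec_is_disjoint; infer_instance

-- ===== CLAIM (what is proved, stated in full; the proofs are below) =====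
def Claim_equal_is_disjoint : Prop := ∀ (path0 : List Int) (path1 : List Int), Dom_is_disjoint path0 path1 → Spec_is_disjoint path0 path1 (is_disjoint path0 path1)

-- ===== LEMMAS AND PROOFS =====

-- on sorted inputs the merge pass decides exactly "no common element"
theorem mergeDisjoint_iff (xs ys : List Int)
    (hx : xs.Pairwise (· ≤ ·)) (hy : ys.Pairwise (· ≤ ·)) :
    mergeDisjoint xs ys = true ↔ ∀ x ∈ xs, x ∉ ys := by
  induction xs, ys using mergeDisjoint.induct with
  | case1 ys => simp [mergeDisjoint]
  | case2 x xs => simp [mergeDisjoint]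
  | case3 x xs y ys hlt ih =>
    rw [List.pairwise_cons] at hx
    simp only [mergeDisjoint, if_pos hlt, ih hx.2 hy]
    constructor
    · intro h z hz
      rcases List.mem_cons.mp hz with rfl | hz'
      · intro hmem
        rcases List.mem_cons.mp hmem with rfl | hmem'
        · omega
        · rw [List.pairwise_cons] at hy
          have := hy.1 z hmem'; omega
      · exact h z hz'
    · intro h z hz; exact h z (List.mem_cons_of_mem _ hz)
  | case4 x xs y ys hnlt hlt ih =>
    rw [List.pairwise_cons] at hy
    simp only [mergeDisjoint, if_neg hnlt, if_pos hlt, ih hx hy.2]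
    constructor
    · intro h z hz hmem
      rcases List.mem_cons.mp hmem with rfl | hmem'
      · rcases List.mem_cons.mp hz with rfl | hz'
        · omega
        · rw [List.pairwise_cons] at hx
          have := hx.1 z hz'; omega
      · exact h z hz hmem'
    · intro h z hz hmem
      exact h z hz (List.mem_cons_of_mem _ hmem)
  | case5 x xs y ys hnlt hnlt' =>
    have hxy : x = y := by omega
    subst hxy
    rw [show mergeDisjoint (x :: xs) (x :: ys) = false by
      simp only [mergeDisjoint, if_neg hnlt]]
    constructor
    · exact fun h => absurd h Bool.false_ne_true
    · exact fun h => absurd List.mem_cons_self (h x List.mem_cons_self)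

theorem is_disjoint_alt_iff (path0 path1 : List Int) :
    is_disjoint_alt path0 path1 = true ↔
      ∀ x ∈ PySem.List.slice path0 (some 1) (some (-1)),
        x ∉ PySem.List.slice path1 (some 1) (some (-1)) := by
  unfold is_disjoint_alt
  rw [mergeDisjoint_iff _ _ (PySem.List.sorted_pairwise _ _) (PySem.List.sorted_pairwise _ _)]
  constructor
  · intro h x hx hmem
    exact h x ((PySem.List.mem_sorted _ _ _ _).mpr hx) ((PySem.List.mem_sorted _ _ _ _).mpr hmem)
  · intro h x hx hmem
    exact h x ((PySem.List.mem_sorted _ _ _ _).mp hx) ((PySem.List.mem_sorted _ _ _ _).mp hmem)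

theorem is_disjoint_iff (path0 path1 : List Int) :
    is_disjoint path0 path1 = true ↔
      ∀ x ∈ PySem.List.slice path0 (some 1) (some (-1)),
        x ∉ PySem.List.slice path1 (some 1) (some (-1)) := by
  unfold is_disjoint
  constructor
  · intro h
    by_contra hcon
    rw [not_forall] at hcon
    obtain ⟨x, hx⟩ := hcon
    rw [not_forall] at hx
    obtain ⟨hx, hmem⟩ := hx
    rw [not_not] at hmem
    rw [if_pos] at h
    · exact Bool.false_ne_true h
    · simp only [List.any_eq_true]; exact ⟨x, hx, by simpa using hmem⟩
  · intro h
    have h1 : ¬ (PySem.List.slice path0 (some 1) (some (-1))).any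
        (fun i => i ∈ PySem.List.slice path1 (some 1) (some (-1))) = true := by
      simp only [List.any_eq_true]
      rintro ⟨x, hx, hmem⟩
      exact h x hx (by simpa using hmem)
    have h2 : ¬ (PySem.List.slice path1 (some 1) (some (-1))).any
        (fun i => i ∈ PySem.List.slice path0 (some 1) (some (-1))) = true := by
      simp only [List.any_eq_true]
      rintro ⟨x, hx, hmem⟩
      exact h x (by simpa using hmem) hx
    simp [h1, h2]

-- ===== VERDICT (by name: the statement is the Claim_ definition above) =====
theorem is_disjoint_spec : Claim_equal_is_disjoint := by
  intro path0 path1 _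
  unfold Spec_is_disjoint
  have hA := is_disjoint_iff path0 path1
  have hB := is_disjoint_alt_iff path0 path1
  by_cases hp : ∀ x ∈ PySem.List.slice path0 (some 1) (some (-1)),
      x ∉ PySem.List.slice path1 (some 1) (some (-1))
  · rw [hA.mpr hp, hB.mpr hp]
  · have h1 : is_disjoint path0 path1 ≠ true := fun h => hp (hA.mp h)
    have h2 : is_disjoint_alt path0 path1 ≠ true := fun h => hp (hB.mp h)
    rw [Bool.eq_false_iff.mpr h1, Bool.eq_false_iff.mpr h2]
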